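-- pv_equiv track=rewrite | github.com/909ma/Repository-for-Study | 프로그래머스/python/옹알이 (2).py | solution
-- ===== SOURCE A (Python) =====
-- def solution(babbling):
--     result = 0
--     for target in babbling:
--         i = -1
--         while True:
--             if target.startswith("aya"):
--                 if i == 1:
--                     break
--                 i = 1
--                 if len(target) == 3:
--                     result += 1
--                     break
--                 else:
--                     target = target[3:]
--             elif target.startswith("ye"):
--                 if i == 2:
--                     break
--                 i = 2
--                 if len(target) == 2:
--                     result += 1
--                     break
--                 else:
--                     target = target[2:]
--             elif target.startswith("woo"):
--                 if i == 3:
--                     break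
--                 i = 3
--                 if len(target) == 3:
--                     result += 1
--                     break
--                 else:
--                     target = target[3:]
--             elif target.startswith("ma"):
--                 if i == 4:
--                     break
--                 i = 4
--                 if len(target) == 2:
--                     result += 1
--                     break
--                 else:
--                     target = target[2:]
--             else:
--                 break
--     return result
-- ===== SOURCE B (Python) =====
-- def solution(babbling):
--     count = 0
--     for word in babbling:
--         p, last, ok = 0, 0, True
--         n = len(word)
--         while ok and p < n:
--             c = word[p]
--             if c == 'a' and last != 1 and word[p + 1:p + 3] == 'ya':
--                 last, p = 1, p + 3
--             elif c == 'y' and last != 2 and word[p + 1:p + 2] == 'e':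
--                 last, p = 2, p + 2
--             elif c == 'w' and last != 3 and word[p + 1:p + 3] == 'oo':
--                 last, p = 3, p + 3
--             elif c == 'm' and last != 4 and word[p + 1:p + 2] == 'a':
--                 last, p = 4, p + 2
--             else:
--                 ok = False
--         if word and ok:
--             count += 1
--     return count
-- ===== Notes on version B (the rewrite author's own statement) =====
-- stated objective: faster
-- what changed: A repeatedly re-slices the word (target = target[3:]) and calls startswith on the whole remaining string each round; B scans each word once with an index pointer, dispatching on the current character and tracking the last token id, so no suffix copies are made.
import Mathlib
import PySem

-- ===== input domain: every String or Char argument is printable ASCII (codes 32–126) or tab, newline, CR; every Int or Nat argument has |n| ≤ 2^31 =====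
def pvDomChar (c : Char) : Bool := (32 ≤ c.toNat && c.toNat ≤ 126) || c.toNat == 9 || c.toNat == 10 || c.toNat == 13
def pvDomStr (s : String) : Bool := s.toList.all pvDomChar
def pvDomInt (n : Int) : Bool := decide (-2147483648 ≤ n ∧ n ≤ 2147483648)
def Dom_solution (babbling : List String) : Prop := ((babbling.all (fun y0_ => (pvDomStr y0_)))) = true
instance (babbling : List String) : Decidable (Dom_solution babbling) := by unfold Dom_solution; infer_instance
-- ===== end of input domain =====

-- B replaces A's repeated startswith + slice-rebuild loop by a single index-pointer
-- scan dispatching on the first character; objective: faster (no quadratic re-slicing).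

-- ===== PORT A =====
-- A's 'while True' loop: returns true iff the loop ended with 'result += 1'.
-- i is the last matched token id (-1 initially), target is the remaining word.
def aLoop (i : Int) (t : List Char) : Bool :=
  if t.take 3 = ['a', 'y', 'a'] then
    if i = 1 then false
    else if t.length = 3 then true
    else aLoop 1 (t.drop 3)
  else if t.take 2 = ['y', 'e'] then
    if i = 2 then false
    else if t.length = 2 then true
    else aLoop 2 (t.drop 2)
  else if t.take 3 = ['w', 'o', 'o'] then
    if i = 3 then false
    else if t.length = 3 then true
    else aLoop 3 (t.drop 3)
  else if t.take 2 = ['m', 'a'] then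
    if i = 4 then false
    else if t.length = 2 then true
    else aLoop 4 (t.drop 2)
  else false
termination_by t.length
decreasing_by
  all_goals cases t with
  | nil => simp_all
  | cons a l => simp; try omega

def solution (babbling : List String) : Int :=
  babbling.foldl (fun result target => if aLoop (-1) target.toList then result + 1 else result) 0

-- ===== PORT B =====
-- B's index-pointer scan, ported as consuming the remaining characters:
-- dispatch on the current character, check the rest of the token, track last token id.
def bLoop : List Char → Int → Bool
  | [], _ => true
  | c :: rest, last =>
    if c = 'a' then
      if last ≠ 1 ∧ rest.take 2 = ['y', 'a'] then bLoop (rest.drop 2) 1 else false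
    else if c = 'y' then
      if last ≠ 2 ∧ rest.take 1 = ['e'] then bLoop (rest.drop 1) 2 else false
    else if c = 'w' then
      if last ≠ 3 ∧ rest.take 2 = ['o', 'o'] then bLoop (rest.drop 2) 3 else false
    else if c = 'm' then
      if last ≠ 4 ∧ rest.take 1 = ['a'] then bLoop (rest.drop 1) 4 else false
    else false
termination_by t _ => t.length
decreasing_by all_goals (simp; try omega)

def solution_alt (babbling : List String) : Int :=
  babbling.foldl
    (fun count word =>
      if !word.toList.isEmpty && bLoop word.toList 0 then count + 1 else count) 0

-- ===== PRECONDITION & SPEC =====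
def Spec_solution (babbling : List String) (out : Int) : Prop := out = solution_alt babbling
instance (babbling : List String) (out : Int) : Decidable (Spec_solution babbling out) := by unfold Spec_solution; infer_instance

-- ===== CLAIM (what is proved, stated in full; the proofs are below) =====
def Claim_equal_solution : Prop := ∀ (babbling : List String), Dom_solution babbling → Spec_solution babbling (solution babbling)

-- ===== LEMMAS AND PROOFS =====

-- 'the two last-token markers agree on the token ids'
def SL (i j : Int) : Prop :=
  (i = 1 ↔ j = 1) ∧ (i = 2 ↔ j = 2) ∧ (i = 3 ↔ j = 3) ∧ (i = 4 ↔ j = 4)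

lemma SL_refl (k : Int) : SL k k := by
  unfold SL; tauto

lemma aLoop_eq_bLoop :
    ∀ (n : Nat) (t : List Char), t.length ≤ n → ∀ i j : Int, SL i j →
      aLoop i t = (!t.isEmpty && bLoop t j) := by
  intro n
  induction n with
  | zero =>
    intro t ht i j _
    have h0 : t = [] := List.eq_nil_of_length_eq_zero (Nat.le_zero.mp ht)
    subst h0
    rw [aLoop]; simp [bLoop]
  | succ n ih =>
    intro t ht i j hij
    obtain ⟨h1, h2, h3, h4⟩ := hij
    cases t with
    | nil => rw [aLoop]; simp [bLoop]
    | cons c rest =>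
      rw [aLoop]
      by_cases hc1 : c = 'a'
      · subst hc1
        by_cases hya : rest.take 2 = ['y', 'a']
        · have htake : ('a' :: rest).take 3 = ['a', 'y', 'a'] := by
            simp [List.take_succ_cons, hya]
          rw [if_pos htake]
          have hlen2 : 2 ≤ rest.length := by
            have := congrArg List.length hya; simp [List.length_take] at this; omega
          by_cases hi1 : i = 1
          · have hj1 : j = 1 := h1.mp hi1
            simp [bLoop, hi1, hj1, hya]
          · have hj1 : ¬ j = 1 := fun h => hi1 (h1.mpr h)
            rw [if_neg hi1]
            by_cases hlen : ('a' :: rest).length = 3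
            · have hr2 : rest.length = 2 := by simpa using hlen
              have hdnil : rest.drop 2 = [] := by simp [List.drop_eq_nil_iff, hr2]
              simp [bLoop, hlen, hya, hj1, hdnil]
            · rw [if_neg hlen]
              have hdrop : ('a' :: rest).drop 3 = rest.drop 2 := by rfl
              rw [hdrop]
              have hne : ¬ (rest.drop 2).isEmpty := by
                simp only [List.isEmpty_iff, List.drop_eq_nil_iff]
                simp at hlen; omega
              rw [ih (rest.drop 2) (by simp at ht ⊢; omega) 1 1 (SL_refl 1)]
              simp [bLoop, hya, hj1, hne]
        · simp [bLoop, List.take_succ_cons, hya]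
      · by_cases hc2 : c = 'y'
        · subst hc2
          by_cases hye : rest.take 1 = ['e']
          · have htake : ('y' :: rest).take 2 = ['y', 'e'] := by
              simp [List.take_succ_cons, hye]
            have hnaya : ¬ ('y' :: rest).take 3 = ['a', 'y', 'a'] := by
              simp [List.take_succ_cons]
            rw [if_neg hnaya, if_pos htake]
            have hlen1 : 1 ≤ rest.length := by
              have := congrArg List.length hye; simp [List.length_take] at this; omega
            by_cases hi2 : i = 2
            · have hj2 : j = 2 := h2.mp hi2
              simp [bLoop, hi2, hj2, hye]
            · have hj2 : ¬ j = 2 := fun h => hi2 (h2.mpr h)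
              rw [if_neg hi2]
              by_cases hlen : ('y' :: rest).length = 2
              · have hr1 : rest.length = 1 := by simpa using hlen
                have hdnil : rest.tail = [] :=
                  List.eq_nil_of_length_eq_zero (by simp [List.length_tail, hr1])
                simp [bLoop, hlen, hye, hj2, List.drop_one, hdnil]
              · rw [if_neg hlen]
                have hdrop : ('y' :: rest).drop 2 = rest.drop 1 := by rfl
                rw [hdrop]
                have hne : rest.tail ≠ [] := by
                  intro h; have := congrArg List.length h
                  simp [List.length_tail] at this; simp at hlen; omega
                rw [ih (rest.drop 1) (by simp at ht ⊢; omega) 2 2 (SL_refl 2)]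
                simp [bLoop, hye, hj2, List.drop_one, hne]
          · simp [bLoop, List.take_succ_cons, hye]
        · by_cases hc3 : c = 'w'
          · subst hc3
            by_cases hoo : rest.take 2 = ['o', 'o']
            · have htake : ('w' :: rest).take 3 = ['w', 'o', 'o'] := by
                simp [List.take_succ_cons, hoo]
              have hn1 : ¬ ('w' :: rest).take 3 = ['a', 'y', 'a'] := by
                simp [List.take_succ_cons]
              have hn2 : ¬ ('w' :: rest).take 2 = ['y', 'e'] := by
                simp [List.take_succ_cons]
              rw [if_neg hn1, if_neg hn2, if_pos htake]
              have hlen2 : 2 ≤ rest.length := by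
                have := congrArg List.length hoo; simp [List.length_take] at this; omega
              by_cases hi3 : i = 3
              · have hj3 : j = 3 := h3.mp hi3
                simp [bLoop, hi3, hj3, hoo]
              · have hj3 : ¬ j = 3 := fun h => hi3 (h3.mpr h)
                rw [if_neg hi3]
                by_cases hlen : ('w' :: rest).length = 3
                · have hr2 : rest.length = 2 := by simpa using hlen
                  have hdnil : rest.drop 2 = [] := by simp [List.drop_eq_nil_iff, hr2]
                  simp [bLoop, hlen, hoo, hj3, hdnil]
                · rw [if_neg hlen]
                  have hdrop : ('w' :: rest).drop 3 = rest.drop 2 := by rfl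
                  rw [hdrop]
                  have hne : ¬ (rest.drop 2).isEmpty := by
                    simp only [List.isEmpty_iff, List.drop_eq_nil_iff]
                    simp at hlen; omega
                  rw [ih (rest.drop 2) (by simp at ht ⊢; omega) 3 3 (SL_refl 3)]
                  simp [bLoop, hoo, hj3, hne]
            · simp [bLoop, List.take_succ_cons, hoo]
          · by_cases hc4 : c = 'm'
            · subst hc4
              by_cases hma : rest.take 1 = ['a']
              · have htake : ('m' :: rest).take 2 = ['m', 'a'] := by
                  simp [List.take_succ_cons, hma]
                have hn1 : ¬ ('m' :: rest).take 3 = ['a', 'y', 'a'] := by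
                  simp [List.take_succ_cons]
                have hn2 : ¬ ('m' :: rest).take 2 = ['y', 'e'] := by
                  simp [List.take_succ_cons]
                have hn3 : ¬ ('m' :: rest).take 3 = ['w', 'o', 'o'] := by
                  simp [List.take_succ_cons]
                rw [if_neg hn1, if_neg hn2, if_neg hn3, if_pos htake]
                have hlen1 : 1 ≤ rest.length := by
                  have := congrArg List.length hma; simp [List.length_take] at this; omega
                by_cases hi4 : i = 4
                · have hj4 : j = 4 := h4.mp hi4
                  simp [bLoop, hi4, hj4, hma]
                · have hj4 : ¬ j = 4 := fun h => hi4 (h4.mpr h)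
                  rw [if_neg hi4]
                  by_cases hlen : ('m' :: rest).length = 2
                  · have hr1 : rest.length = 1 := by simpa using hlen
                    have hdnil : rest.tail = [] :=
                      List.eq_nil_of_length_eq_zero (by simp [List.length_tail, hr1])
                    simp [bLoop, hlen, hma, hj4, List.drop_one, hdnil]
                  · rw [if_neg hlen]
                    have hdrop : ('m' :: rest).drop 2 = rest.drop 1 := by rfl
                    rw [hdrop]
                    have hne : rest.tail ≠ [] := by
                      intro h; have := congrArg List.length h
                      simp [List.length_tail] at this; simp at hlen; omega
                    rw [ih (rest.drop 1) (by simp at ht ⊢; omega) 4 4 (SL_refl 4)]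
                    simp [bLoop, hma, hj4, List.drop_one, hne]
              · simp [bLoop, List.take_succ_cons, hma, hc1, hc2, hc3]
            · simp [bLoop, List.take_succ_cons, hc1, hc2, hc3, hc4]

lemma aLoop_start (t : List Char) : aLoop (-1) t = (!t.isEmpty && bLoop t 0) := by
  apply aLoop_eq_bLoop t.length t (le_refl _)
  unfold SL; refine ⟨?_, ?_, ?_, ?_⟩ <;> constructor <;> intro h <;> omega

theorem solution_spec : Claim_equal_solution := by
  intro babbling _
  unfold Spec_solution solution solution_alt
  simp only [aLoop_start]
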